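-- pv_equiv track=rewrite | github.com/SoraK93/dsa-gfg-full-course | DSA/Hashing/union_two_array.py | loop_union
-- ===== SOURCE A (Python) =====
-- def loop_union(arr1, arr2, n, m):
--     res = 0
--     union = [0] * (n+m)
--     for i in range(n):
--         union[i] = arr1[i]
--     for i in range(m):
--         union[i+n] = arr2[i]
--
--     for i in range(n+m):
--         flag = False
--         for j in range(i):
--             if union[i] == union[j]:
--                 flag = True
--                 break
--
--         if flag == False:
--             res += 1
--
--     return res
-- ===== SOURCE B (Python) =====
-- def loop_union(arr1, arr2, n, m):
--     distinct = set()
--     for i in range(n):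
--         distinct.add(arr1[i])
--     for i in range(m):
--         distinct.add(arr2[i])
--     return len(distinct)
-- ===== Notes on version B (the rewrite author's own statement) =====
-- stated objective: faster
-- what changed: Replaces A's fill-an-array-then-rescan-all-earlier-indices duplicate detection by a single pass that inserts each prefix element into a hash set and returns the set's size.
-- outside the precondition, e.g. on loop_union([5], [1, 2, 3], -1, 3): A returns 2, B returns 3
import Mathlib
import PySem

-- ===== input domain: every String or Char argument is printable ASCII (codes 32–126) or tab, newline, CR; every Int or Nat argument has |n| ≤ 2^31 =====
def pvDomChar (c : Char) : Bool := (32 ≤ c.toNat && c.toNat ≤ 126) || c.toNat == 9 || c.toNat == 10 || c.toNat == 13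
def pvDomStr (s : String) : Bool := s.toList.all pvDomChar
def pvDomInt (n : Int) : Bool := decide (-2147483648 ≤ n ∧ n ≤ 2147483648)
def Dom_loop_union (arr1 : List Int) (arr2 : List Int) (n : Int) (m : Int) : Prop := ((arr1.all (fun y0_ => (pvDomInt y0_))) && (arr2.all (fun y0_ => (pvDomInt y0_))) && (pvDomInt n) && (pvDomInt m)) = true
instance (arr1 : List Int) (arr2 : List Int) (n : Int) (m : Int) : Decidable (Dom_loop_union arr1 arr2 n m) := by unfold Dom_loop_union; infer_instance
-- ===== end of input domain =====

-- B replaces A's fill-array-then-quadratic-duplicate-scan by one pass over the two prefixes that inserts each element into a set and returns its size: asymptotically faster.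


-- ===== PORT A =====
def loop_union (arr1 : List Int) (arr2 : List Int) (n : Int) (m : Int) : Int :=
  -- res = 0; union = [0] * (n+m)
  let union0 : List Int := List.replicate (n + m).toNat 0
  -- for i in range(n): union[i] = arr1[i]
  let u1 := (PySem.List.pyRange 0 n 1).foldl
    (fun u i => PySem.List.pySetD u i (PySem.List.pyGetD arr1 i 0)) union0
  -- for i in range(m): union[i+n] = arr2[i]
  let u2 := (PySem.List.pyRange 0 m 1).foldl
    (fun u i => PySem.List.pySetD u (i + n) (PySem.List.pyGetD arr2 i 0)) u1
  -- for i in range(n+m): flag = any earlier equal; if not flag: res += 1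
  (PySem.List.pyRange 0 (n + m) 1).foldl
    (fun res i =>
      let flag := (PySem.List.pyRange 0 i 1).any
        (fun j => PySem.List.pyGetD u2 i 0 == PySem.List.pyGetD u2 j 0)
      if flag = false then res + 1 else res) 0

-- ===== PORT B =====
def loop_union_alt (arr1 : List Int) (arr2 : List Int) (n : Int) (m : Int) : Int :=
  -- distinct = set()
  -- for i in range(n): distinct.add(arr1[i])
  let s1 := (PySem.List.pyRange 0 n 1).foldl
    (fun s i => PySem.Set.add s (PySem.List.pyGetD arr1 i 0)) (PySem.Set.empty)
  -- for i in range(m): distinct.add(arr2[i])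
  let s2 := (PySem.List.pyRange 0 m 1).foldl
    (fun s i => PySem.Set.add s (PySem.List.pyGetD arr2 i 0)) s1
  -- return len(distinct)
  (s2.length : Int)

-- ===== PRECONDITION & SPEC =====
-- Pre_ is the natural domain "first n of arr1, first m of arr2" (plus the trivial corner where both
-- counts are nonpositive and every loop is empty): it excludes inputs where A raises IndexError
-- (n or m beyond its list, a positive count paired with a negative one) and the corner n < 0 < m where
-- A returns an accidental value via Python's negative-index wraparound in 'union[i+n] = arr2[i]'.
def Pre_loop_union (arr1 : List Int) (arr2 : List Int) (n : Int) (m : Int) : Prop :=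
  (0 ≤ n ∧ n ≤ arr1.length ∧ 0 ≤ m ∧ m ≤ arr2.length) ∨ (n ≤ 0 ∧ m ≤ 0)
instance (arr1 : List Int) (arr2 : List Int) (n : Int) (m : Int) : Decidable (Pre_loop_union arr1 arr2 n m) := by unfold Pre_loop_union; infer_instance
def pvWitness_loop_union : List Int × List Int × Int × Int := ([1, 2, 1], [2, 3], 3, 2)

def Spec_loop_union (arr1 : List Int) (arr2 : List Int) (n : Int) (m : Int) (out : Int) : Prop := out = loop_union_alt arr1 arr2 n m
instance (arr1 : List Int) (arr2 : List Int) (n : Int) (m : Int) (out : Int) : Decidable (Spec_loop_union arr1 arr2 n m out) := by unfold Spec_loop_union; infer_instance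

-- ===== CLAIM (what is proved, stated in full; the proofs are below) =====
def Claim_equal_loop_union : Prop := ∀ (arr1 : List Int) (arr2 : List Int) (n : Int) (m : Int), Dom_loop_union arr1 arr2 n m → Pre_loop_union arr1 arr2 n m → Spec_loop_union arr1 arr2 n m (loop_union arr1 arr2 n m)

-- ===== LEMMAS AND PROOFS =====

-- Filling loop: writing xs[0..k) into u0 at offset c yields take/replace/drop.
theorem pv_fill (xs : List Int) (c : Nat) :
    ∀ (k : Nat) (u0 : List Int), k ≤ xs.length → c + k ≤ u0.length →
    (List.range k).foldl (fun u i => u.set (c + i) (xs.getD i 0)) u0 =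
      u0.take c ++ xs.take k ++ u0.drop (c + k) := by
  intro k
  induction k with
  | zero => intro u0 _ _; simp
  | succ k ih =>
    intro u0 hk hlen
    rw [List.range_succ, List.foldl_append, ih u0 (by omega) (by omega)]
    simp only [List.foldl_cons, List.foldl_nil]
    have hck : c + k < u0.length := by omega
    have hks : k < xs.length := by omega
    have htc : (u0.take c).length = c := by simp; omega
    have htk : (xs.take k).length = k := by simp; omega
    have hdrop : u0.drop (c + k) = u0[c + k] :: u0.drop (c + k + 1) := by
      rw [List.drop_eq_getElem_cons hck]
    rw [List.append_assoc, List.set_append_right _ _ (by omega), htc]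
    have e1 : c + k - c = k := by omega
    rw [e1, List.set_append_right _ _ (by omega), htk]
    have e2 : k - k = 0 := by omega
    rw [e2, hdrop, List.set_cons_zero]
    have e3 : c + (k + 1) = c + k + 1 := by omega
    have hgd : xs.getD k 0 = xs[k] := List.getD_eq_getElem xs 0 hks
    have ht1 : List.take (k + 1) xs = List.take k xs ++ [xs[k]] := by
      rw [List.take_add_one]; simp [List.getElem?_eq_getElem hks]
    rw [e3, hgd, ht1]
    simp only [List.append_assoc, List.singleton_append]

-- Counting loop: the first-occurrence count over a prefix of L equals |set(prefix)|.
theorem pv_count (L : List Int) :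
    ∀ (k : Nat), k ≤ L.length →
    (List.range k).foldl
      (fun res i => if ((List.range i).any (fun j => L.getD i 0 == L.getD j 0)) = false
                    then res + 1 else res) (0 : Int)
      = ((PySem.Set.ofList (L.take k)).length : Int) := by
  intro k
  induction k with
  | zero => intro _; simp
  | succ k ih =>
    intro hk
    rw [List.range_succ, List.foldl_append, ih (by omega)]
    simp only [List.foldl_cons, List.foldl_nil]
    have hks : k < L.length := by omega
    have htake : L.take (k + 1) = L.take k ++ [L[k]] := by
      rw [List.take_add_one]; simp [List.getElem?_eq_getElem hks]
    have hmem : ((List.range k).any (fun j => L.getD k 0 == L.getD j 0)) = true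
        ↔ L[k] ∈ L.take k := by
      simp only [List.any_eq_true, List.mem_range, beq_iff_eq]
      constructor
      · rintro ⟨j, hj, he⟩
        rw [List.getD_eq_getElem L 0 hks, List.getD_eq_getElem L 0 (by omega)] at he
        have hjt : j < (L.take k).length := by simp; omega
        have : (L.take k)[j] = L[j] := List.getElem_take
        rw [he, ← this]
        exact List.getElem_mem hjt
      · intro hm
        obtain ⟨j, hj, he⟩ := List.mem_iff_getElem.mp hm
        have hj2 : j < k ∧ j < L.length := by simpa using hj
        have hjk : j < k := hj2.1
        refine ⟨j, hjk, ?_⟩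
        rw [List.getD_eq_getElem L 0 hks, List.getD_eq_getElem L 0 (by omega)]
        rw [← he]
        exact List.getElem_take
    rw [htake, PySem.Set.ofList_append_singleton, PySem.Set.add_eq_ite]
    by_cases hin : L[k] ∈ L.take k
    · have hany := hmem.mpr hin
      have hsin : L[k] ∈ PySem.Set.ofList (L.take k) := (PySem.Set.mem_ofList _ _).mpr hin
      rw [hany, if_neg (by simp), if_pos hsin]
    · have hany : ((List.range k).any (fun j => L.getD k 0 == L.getD j 0)) = false :=
        Bool.eq_false_iff.mpr (fun h => hin (hmem.mp h))
      have hsin : L[k] ∉ PySem.Set.ofList (L.take k) :=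
        fun h => hin ((PySem.Set.mem_ofList _ _).mp h)
      rw [hany, if_pos rfl, if_neg hsin]
      simp only [List.length_append, List.length_cons, List.length_nil]
      push_cast
      ring

-- Index loop over a prefix is a fold over the taken prefix.
theorem pv_addloop {β : Type} (xs : List Int) (f : β → Int → β) :
    ∀ (k : Nat) (s0 : β), k ≤ xs.length →
    (List.range k).foldl (fun s i => f s (xs.getD i 0)) s0 = (xs.take k).foldl f s0 := by
  intro k
  induction k with
  | zero => intro s0 _; simp
  | succ k ih =>
    intro s0 hk
    have hks : k < xs.length := by omega
    have ht1 : List.take (k + 1) xs = List.take k xs ++ [xs[k]] := by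
      rw [List.take_add_one]; simp [List.getElem?_eq_getElem hks]
    rw [List.range_succ, List.foldl_append, ih s0 (by omega), ht1, List.foldl_append]
    simp [List.getElem?_eq_getElem hks]

-- ===== VERDICT (by name: the statement is the Claim_ definition above) =====
theorem loop_union_spec : Claim_equal_loop_union := by
  intro arr1 arr2 n m _ hpre
  rcases hpre with ⟨hn0, hn1, hm0, hm1⟩ | ⟨hn, hm⟩
  case inr =>
    -- both counts nonpositive: every loop is empty, both sides return 0
    unfold Spec_loop_union loop_union loop_union_alt
    rw [PySem.List.pyRange_one_eq_nil hn, PySem.List.pyRange_one_eq_nil hm,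
      PySem.List.pyRange_one_eq_nil (by omega : n + m ≤ 0)]
    rfl
  unfold Spec_loop_union loop_union loop_union_alt
  obtain ⟨n', rfl⟩ : ∃ n' : Nat, n = (n' : Int) := ⟨n.toNat, by omega⟩
  obtain ⟨m', rfl⟩ : ∃ m' : Nat, m = (m' : Int) := ⟨m.toNat, by omega⟩
  have hn1' : n' ≤ arr1.length := by exact_mod_cast hn1
  have hm1' : m' ≤ arr2.length := by exact_mod_cast hm1
  have hcast : ((n' : Int) + (m' : Int)) = ((n' + m' : Nat) : Int) := by push_cast; ring
  rw [hcast]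
  simp only [PySem.List.pyRange_zero_nat, List.foldl_map]
  have hrepl : (((n' + m' : Nat) : Int)).toNat = n' + m' := by omega
  rw [hrepl]
  -- first fill loop
  have hf1 : (fun (u : List Int) (i : Nat) =>
        PySem.List.pySetD u (i : Int) (PySem.List.pyGetD arr1 (i : Int) 0))
      = (fun u i => u.set (0 + i) (arr1.getD i 0)) := by
    funext u i
    simp [PySem.List.pySetD_natCast, PySem.List.pyGetD_natCast]
  rw [hf1, pv_fill arr1 0 n' (List.replicate (n' + m') 0) hn1' (by simp)]
  simp only [List.take_zero, List.nil_append, Nat.zero_add, List.drop_replicate]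
  have hr1 : n' + m' - n' = m' := by omega
  rw [hr1]
  -- second fill loop
  have hf2 : (fun (u : List Int) (i : Nat) =>
        PySem.List.pySetD u ((i : Int) + (n' : Int)) (PySem.List.pyGetD arr2 (i : Int) 0))
      = (fun u i => u.set (n' + i) (arr2.getD i 0)) := by
    funext u i
    have : ((i : Int) + (n' : Int)) = ((n' + i : Nat) : Int) := by push_cast; ring
    rw [PySem.List.pyGetD_natCast, this, PySem.List.pySetD_natCast]
  have hlen2 : n' + m' ≤ (arr1.take n' ++ List.replicate m' (0 : Int)).length := by
    simp only [List.length_append, List.length_take, List.length_replicate]; omega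
  rw [hf2, pv_fill arr2 n' m' (arr1.take n' ++ List.replicate m' 0) hm1' hlen2]
  have htk2 : (arr1.take n' ++ List.replicate m' (0 : Int)).take n' = arr1.take n' := by
    rw [List.take_append_of_le_length (by simp only [List.length_take]; omega)]
    simp
  have hdr2 : (arr1.take n' ++ List.replicate m' (0 : Int)).drop (n' + m') = [] := by
    apply List.drop_eq_nil_of_le
    simp only [List.length_append, List.length_take, List.length_replicate]; omega
  rw [htk2, hdr2, List.append_nil]
  set L := arr1.take n' ++ arr2.take m' with hL
  have hLlen : n' + m' ≤ L.length := by
    simp only [hL, List.length_append, List.length_take]; omega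
  -- counting loop
  rw [PySem.List.foldl_congr_mem (List.range (n' + m')) _
      (fun res i => if ((List.range i).any (fun j => L.getD i 0 == L.getD j 0)) = false
                    then res + 1 else res) 0
      (fun acc x _ => by
        simp [List.any_map, Function.comp, PySem.List.pyGetD_natCast]),
    pv_count L (n' + m') hLlen, List.take_of_length_le ?hle]
  case hle =>
    simp only [hL, List.length_append, List.length_take]; omega
  -- B's side: the two add-loops build set(arr1[:n] ++ arr2[:m])
  have hg1 : (fun (s : PySem.Set Int) (i : Nat) =>
        PySem.Set.add s (PySem.List.pyGetD arr1 (i : Int) 0))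
      = (fun s i => PySem.Set.add s (arr1.getD i 0)) := by
    funext s i; rw [PySem.List.pyGetD_natCast]
  have hg2 : (fun (s : PySem.Set Int) (i : Nat) =>
        PySem.Set.add s (PySem.List.pyGetD arr2 (i : Int) 0))
      = (fun s i => PySem.Set.add s (arr2.getD i 0)) := by
    funext s i; rw [PySem.List.pyGetD_natCast]
  rw [hg1, hg2, pv_addloop arr1 _ n' PySem.Set.empty hn1',
    pv_addloop arr2 _ m' _ hm1']
  have : (arr2.take m').foldl PySem.Set.add ((arr1.take n').foldl PySem.Set.add PySem.Set.empty)
      = PySem.Set.ofList L := by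
    rw [hL, PySem.Set.ofList_append]
    rfl
  rw [this]
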